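-- pv_equiv track=rewrite | github.com/dfinson/coderecon | recon-lab/src/cpl_lab/pr_to_ground_truth.py | _first_meaningful_paragraph
-- ===== SOURCE A (Python) =====
-- def _first_meaningful_paragraph(text: str) -> str:
--     """Extract the first non-trivial paragraph from issue text."""
--     # Strip markdown headers, code blocks, and short lines
--     lines: list[str] = []
--     in_code_block = False
--     for line in text.split("\n"):
--         stripped = line.strip()
--         if stripped.startswith("```"):
--             in_code_block = not in_code_block
--             continue
--         if in_code_block:
--             continue
--         if stripped.startswith("#"):
--             continue
--         if len(stripped) < 10:
--             if lines:
--                 break  # End of paragraph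
--             continue
--         lines.append(stripped)
--
--     return " ".join(lines) if lines else text[:300]
-- ===== SOURCE B (Python) =====
-- def _first_meaningful_paragraph(text: str) -> str:
--     """Extract the first non-trivial paragraph from issue text."""
--     # Pass 1: fence-parity filter — keep stripped lines seen while an even
--     # number of ``` fences has been encountered (fence lines themselves dropped).
--     visible = []
--     fences = 0
--     for line in text.split("\n"):
--         s = line.strip()
--         if s.startswith("```"):
--             fences += 1
--         elif fences % 2 == 0:
--             visible.append(s)
--     # Pass 2: drop header lines entirely; the paragraph is then the first
--     # maximal run of long (len >= 10) lines: skip the short prefix, take while long.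
--     content = [s for s in visible if not s.startswith("#")]
--     i = 0
--     while i < len(content) and len(content[i]) < 10:
--         i += 1
--     j = i
--     while j < len(content) and len(content[j]) >= 10:
--         j += 1
--     para = content[i:j]
--     return " ".join(para) if para else text[:300]
-- ===== Notes on version B (the rewrite author's own statement) =====
-- stated objective: alternative
-- what changed: Replaces A's single stateful accumulator loop (boolean code-block toggle, break on short line) by a three-stage pipeline: a fence-counter parity filter over the lines, a header filter, and a drop-short-prefix/take-while-long scan that selects the paragraph as the first maximal run of long lines.
import Mathlib
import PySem

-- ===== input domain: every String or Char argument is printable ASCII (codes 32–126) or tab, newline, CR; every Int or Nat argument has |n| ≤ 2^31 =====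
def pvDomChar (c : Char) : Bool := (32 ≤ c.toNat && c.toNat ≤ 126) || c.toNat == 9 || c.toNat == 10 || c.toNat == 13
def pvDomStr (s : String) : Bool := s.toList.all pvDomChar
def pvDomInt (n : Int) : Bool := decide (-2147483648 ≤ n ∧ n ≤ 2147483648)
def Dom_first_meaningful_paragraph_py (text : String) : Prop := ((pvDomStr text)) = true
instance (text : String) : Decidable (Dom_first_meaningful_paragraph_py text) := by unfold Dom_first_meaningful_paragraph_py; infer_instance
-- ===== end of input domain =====

-- B replaces A's single stateful loop by a pipeline: fence-parity filter, header filter,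
-- then drop-short-prefix / take-while-long; same O(n) cost, different decomposition.

-- ===== PORT A =====
-- A's single loop: state = (accumulated lines, in_code_block); 'break' returns the accumulator.
def pvALoop : List String → List String → Bool → List String
  | [], acc, _ => acc
  | l :: rest, acc, cb =>
    let s := PySem.Str.strip l
    if PySem.Str.startswith s "```" then pvALoop rest acc (!cb)
    else if cb then pvALoop rest acc cb
    else if PySem.Str.startswith s "#" then pvALoop rest acc cb
    else if PySem.Str.len s < 10 then
      if acc ≠ [] then acc else pvALoop rest acc cb
    else pvALoop rest (acc ++ [s]) cb

def first_meaningful_paragraph_py (text : String) : String :=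
  let lines := pvALoop ((PySem.Str.split? text "\n").getD []) [] false
  if lines ≠ [] then PySem.Str.join " " lines else PySem.Str.slice text none (some 300)

-- ===== PORT B =====
-- Pass 1: fence-counter parity filter (keep a stripped line iff fences seen so far is even).
def pvFence : List String → Nat → List String
  | [], _ => []
  | l :: rest, n =>
    let s := PySem.Str.strip l
    if PySem.Str.startswith s "```" then pvFence rest (n + 1)
    else if n % 2 == 0 then s :: pvFence rest n
    else pvFence rest n

-- Source B's two index-advancing while loops and content[i:j] are exactly
-- dropWhile short / takeWhile long on content.
def pvShort (s : String) : Bool := decide (PySem.Str.len s < 10)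

def first_meaningful_paragraph_py_alt (text : String) : String :=
  let visible := pvFence ((PySem.Str.split? text "\n").getD []) 0
  let content := visible.filter (fun s => !PySem.Str.startswith s "#")
  let para := (content.dropWhile pvShort).takeWhile (fun s => !pvShort s)
  if para ≠ [] then PySem.Str.join " " para else PySem.Str.slice text none (some 300)

-- ===== PRECONDITION & SPEC =====
def Spec_first_meaningful_paragraph_py (text : String) (out : String) : Prop := out = first_meaningful_paragraph_py_alt text
instance (text : String) (out : String) : Decidable (Spec_first_meaningful_paragraph_py text out) := by unfold Spec_first_meaningful_paragraph_py; infer_instance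

-- ===== CLAIM (what is proved, stated in full; the proofs are below) =====
def Claim_equal_first_meaningful_paragraph_py : Prop := ∀ (text : String), Dom_first_meaningful_paragraph_py text → Spec_first_meaningful_paragraph_py text (first_meaningful_paragraph_py text)

-- ===== LEMMAS AND PROOFS =====
-- Proof-only: B's fence-counter pass with the counter abstracted to its parity as a Bool.
def pvFenceB : List String → Bool → List String
  | [], _ => []
  | l :: rest, cb =>
    let s := PySem.Str.strip l
    if PySem.Str.startswith s "```" then pvFenceB rest (!cb)
    else if cb then pvFenceB rest cb
    else s :: pvFenceB rest cb

theorem pvFence_parity (ls : List String) : ∀ (n : Nat), pvFence ls n = pvFenceB ls (n % 2 == 1) := by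
  induction ls with
  | nil => intro n; rfl
  | cons l rest ih =>
    intro n
    simp only [pvFence, pvFenceB]
    by_cases h1 : PySem.Str.startswith (PySem.Str.strip l) "```" = true
    · rw [if_pos h1, if_pos h1, ih (n + 1)]
      congr 1
      rcases Nat.mod_two_eq_zero_or_one n with h | h <;> simp [Nat.add_mod, h]
    · rw [if_neg h1, if_neg h1, ih n]
      rcases Nat.mod_two_eq_zero_or_one n with h | h <;> simp [h]

-- Fusing B's staged pipeline back into A's single loop, for both accumulator states.
theorem pvLoopSplit (ls : List String) : ∀ (cb : Bool) (acc : List String),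
    pvALoop ls acc cb =
      (if acc = [] then
        ((List.filter (fun s => !PySem.Chars.startswith s.toList ['#'])
            (pvFenceB ls cb)).dropWhile pvShort).takeWhile (fun s => !pvShort s)
      else acc ++ (List.filter (fun s => !PySem.Chars.startswith s.toList ['#'])
            (pvFenceB ls cb)).takeWhile (fun s => !pvShort s)) := by
  induction ls with
  | nil =>
    intro cb acc
    by_cases h : acc = [] <;> simp [pvALoop, pvFenceB, h]
  | cons l rest ih =>
    intro cb acc
    simp only [pvALoop, pvFenceB, PySem.Str.startswith_eq, PySem.Str.len_eq]
    by_cases h1 : PySem.Chars.startswith (PySem.Chars.strip l.toList) ['`', '`', '`'] = true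
    · simp [h1, ih (!cb) acc]
    · by_cases h2 : cb
      · simp [h1, h2, ih true acc]
      · simp only [h2, if_false, Bool.false_eq_true]
        by_cases h3 : PySem.Chars.startswith (PySem.Chars.strip l.toList) ['#'] = true
        · simp [h1, h3, List.filter_cons, ih false acc]
        · by_cases h4 : ((PySem.Chars.strip l.toList).length : Int) < 10
          · have hs : pvShort (PySem.Str.strip l) = true := by
              simp only [pvShort, PySem.Str.len_eq, PySem.Str.toList_strip,
                decide_eq_true_eq]
              exact h4
            by_cases h5 : acc = []
            · simp [h1, h3, h4, h5, hs, List.filter_cons, List.dropWhile_cons,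
                ih false []]
            · simp [h1, h3, h4, h5, hs, List.filter_cons, List.takeWhile_cons]
          · have hs : pvShort (PySem.Str.strip l) = false := by
              simp only [pvShort, PySem.Str.len_eq, PySem.Str.toList_strip,
                decide_eq_false_iff_not]
              exact h4
            by_cases h5 : acc = []
            · have hone := ih false [PySem.Str.strip l]
              simp only [List.cons_ne_self, if_false, reduceCtorEq] at hone
              simp [h1, h3, h4, h5, hs, List.filter_cons, List.dropWhile_cons,
                List.takeWhile_cons, hone]
            · have happ := ih false (acc ++ [PySem.Str.strip l])
              simp only [List.append_ne_nil_of_right_ne_nil, if_false,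
                reduceCtorEq, List.cons_ne_self] at happ
              simp [h1, h3, h4, h5, hs, List.filter_cons, List.takeWhile_cons,
                happ, List.append_assoc]

-- ===== VERDICT (by name: the statement is the Claim_ definition above) =====
theorem first_meaningful_paragraph_py_spec : Claim_equal_first_meaningful_paragraph_py := by
  intro text _
  unfold Spec_first_meaningful_paragraph_py first_meaningful_paragraph_py first_meaningful_paragraph_py_alt
  rw [pvLoopSplit, pvFence_parity]
  simp only [PySem.Str.startswith_eq]
  rfl
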